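-- pv_equiv track=rewrite | github.com/amadeusdotpng/aoc | y25_py/d04.py | get_accessible
-- ===== SOURCE A (Python) =====
-- from itertools import product
--
-- def get_accessible(S: set[tuple[int, int]]):
--     P = set()
--     for (r, c) in S:
--         ct = 0
--         for (rd, cd) in product((-1, 0, 1), repeat=2):
--             ct += (r+rd, c+cd) in S and (rd != 0 or cd != 0)
--
--         if ct >= 4: continue
--         P.add((r, c))
--     return P
-- ===== SOURCE B (Python) =====
-- def get_accessible(S):
--     def close(p, q):
--         return q != p and abs(p[0] - q[0]) <= 1 and abs(p[1] - q[1]) <= 1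
--     return {p for p in S if sum(1 for q in S if close(p, q)) < 4}
-- ===== Notes on version B (the rewrite author's own statement) =====
-- stated objective: alternative
-- what changed: Drops the 8-offset membership probing entirely: B counts, for each cell, the other cells of S within Chebyshev distance 1 by scanning S itself, and keeps those with fewer than 4 such cells.
import Mathlib
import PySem

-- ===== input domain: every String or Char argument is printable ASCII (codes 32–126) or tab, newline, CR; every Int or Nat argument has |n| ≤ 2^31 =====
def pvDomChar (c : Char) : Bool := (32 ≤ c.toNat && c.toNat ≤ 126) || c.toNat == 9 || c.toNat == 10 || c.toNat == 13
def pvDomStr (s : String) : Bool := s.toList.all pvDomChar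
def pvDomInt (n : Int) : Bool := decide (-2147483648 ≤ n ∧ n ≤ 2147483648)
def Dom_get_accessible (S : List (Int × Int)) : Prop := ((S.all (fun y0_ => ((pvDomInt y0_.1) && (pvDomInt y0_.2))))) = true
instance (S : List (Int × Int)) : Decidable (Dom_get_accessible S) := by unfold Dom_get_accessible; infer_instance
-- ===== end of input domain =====

-- B drops the 8-offset membership probing: it counts, for each cell, the OTHER cells of S
-- within Chebyshev distance 1 by scanning S itself (alternative decomposition, not faster).

-- ===== PORT A =====
-- itertools.product((-1,0,1), repeat=2), in product order
def pvProd9 : List (Int × Int) :=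
  [(-1,-1),(-1,0),(-1,1),(0,-1),(0,0),(0,1),(1,-1),(1,0),(1,1)]

def get_accessible (S : List (Int × Int)) : List (Int × Int) :=
  S.foldl (fun P rc =>
    let ct : Int := pvProd9.foldl (fun ct d =>
      ct + (if (rc.1 + d.1, rc.2 + d.2) ∈ S ∧ (d.1 ≠ 0 ∨ d.2 ≠ 0) then 1 else 0)) 0
    if ct ≥ 4 then P else PySem.Set.add P rc) PySem.Set.empty

-- ===== PORT B =====
-- close(p, q): q is a distinct cell within Chebyshev distance 1 of p
def pvClose (p q : Int × Int) : Bool :=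
  q ≠ p && |p.1 - q.1| ≤ 1 && |p.2 - q.2| ≤ 1

def get_accessible_alt (S : List (Int × Int)) : List (Int × Int) :=
  PySem.Set.ofList (S.filter (fun p =>
    ((S.filter (fun q => pvClose p q)).map (fun _ => (1 : Int))).sum < 4))

-- ===== PRECONDITION & SPEC =====
-- A's parameter is a Python set, so under the type convention its list holds DISTINCT elements;
-- on a list with duplicates B's pairwise count would count a neighbor several times, a shape no set argument produces.
def Pre_get_accessible (S : List (Int × Int)) : Prop := S.Nodup
instance (S : List (Int × Int)) : Decidable (Pre_get_accessible S) := by unfold Pre_get_accessible; infer_instance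
def pvWitness_get_accessible : (List (Int × Int)) := [(0,0),(0,1),(1,0),(1,1),(5,5)]

def Spec_get_accessible (S : List (Int × Int)) (out : List (Int × Int)) : Prop := out = get_accessible_alt S
instance (S : List (Int × Int)) (out : List (Int × Int)) : Decidable (Spec_get_accessible S out) := by unfold Spec_get_accessible; infer_instance

-- ===== CLAIM (what is proved, stated in full; the proofs are below) =====
def Claim_equal_get_accessible : Prop := ∀ (S : List (Int × Int)), Dom_get_accessible S → Pre_get_accessible S → Spec_get_accessible S (get_accessible S)

-- ===== LEMMAS AND PROOFS =====

-- A's inner gather count at cell x, relative to the whole set S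
def pvCt (S : List (Int × Int)) (x : Int × Int) : Int :=
  pvProd9.foldl (fun ct d =>
    ct + (if (x.1 + d.1, x.2 + d.2) ∈ S ∧ (d.1 ≠ 0 ∨ d.2 ≠ 0) then 1 else 0)) 0

lemma ite_or_mem {y : Int × Int} {T : List (Int × Int)} (hy : y ∉ T) (c : Int × Int) :
    (if (c = y ∨ c ∈ T) then (1:Int) else 0)
    = (if c = y then (1:Int) else 0) + (if c ∈ T then (1:Int) else 0) := by
  by_cases h1 : c = y
  · subst h1; simp [hy]
  · simp [h1]

-- one cell's contribution to A's gather count = B's closeness test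
lemma indicator_eq_close (x y : Int × Int) :
    (if (x.1 + -1, x.2 + -1) = y then (1:Int) else 0)
    + (if (x.1 + -1, x.2) = y then (1:Int) else 0)
    + (if (x.1 + -1, x.2 + 1) = y then (1:Int) else 0)
    + (if (x.1, x.2 + -1) = y then (1:Int) else 0)
    + (if (x.1, x.2 + 1) = y then (1:Int) else 0)
    + (if (x.1 + 1, x.2 + -1) = y then (1:Int) else 0)
    + (if (x.1 + 1, x.2) = y then (1:Int) else 0)
    + (if (x.1 + 1, x.2 + 1) = y then (1:Int) else 0)
    = if pvClose x y then (1:Int) else 0 := by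
  obtain ⟨x1, x2⟩ := x; obtain ⟨y1, y2⟩ := y
  simp only [pvClose, Prod.mk.injEq, ne_eq, Bool.and_eq_true, decide_eq_true_eq, abs_le]
  split_ifs <;> omega

-- B's counting sum over S equals A's gather count (S without duplicates)
lemma sum_close_eq_ct (S : List (Int × Int)) (hS : S.Nodup) (x : Int × Int) :
    ((S.filter (fun q => pvClose x q)).map (fun _ => (1 : Int))).sum = pvCt S x := by
  induction S with
  | nil => simp [pvCt, pvProd9]
  | cons y T ih =>
      obtain ⟨hy, hT⟩ := List.nodup_cons.mp hS
      have ihT := ih hT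
      simp only [List.filter_cons]
      have hsplit : pvCt (y :: T) x = (if pvClose x y then (1:Int) else 0) + pvCt T x := by
        simp only [pvCt, pvProd9, List.foldl_cons, List.foldl_nil, List.mem_cons]
        norm_num
        simp only [ite_or_mem hy]
        rw [← indicator_eq_close x y]
        ring
      rw [hsplit, ← ihT]
      by_cases hc : pvClose x y <;> simp [hc]

-- conditional Set.add fold = fold over the filtered list
lemma foldl_ite_filter (l : List (Int × Int)) (p : Int × Int → Prop) [DecidablePred p]
    (acc : List (Int × Int)) :
    l.foldl (fun a x => if p x then a else PySem.Set.add a x) acc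
    = (l.filter (fun x => !(decide (p x)))).foldl PySem.Set.add acc := by
  induction l generalizing acc with
  | nil => rfl
  | cons y T ih =>
      by_cases h : p y <;> simp [h, ih]

-- ===== VERDICT (by name: the statement is the Claim_ definition above) =====
theorem get_accessible_spec : Claim_equal_get_accessible := by
  intro S _ hpre
  unfold Spec_get_accessible get_accessible get_accessible_alt
  show S.foldl (fun P rc => if pvCt S rc ≥ 4 then P else PySem.Set.add P rc) PySem.Set.empty
      = PySem.Set.ofList (S.filter (fun p =>
          ((S.filter (fun q => pvClose p q)).map (fun _ => (1 : Int))).sum < 4))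
  have hfilter : S.filter (fun p =>
        decide (((S.filter (fun q => pvClose p q)).map (fun _ => (1 : Int))).sum < 4))
      = S.filter (fun p => !(decide (pvCt S p ≥ 4))) := by
    apply List.filter_congr
    intro p _
    rw [sum_close_eq_ct S hpre p]
    by_cases h : pvCt S p ≥ 4
    · simp [h]
    · simp [h]; omega
  rw [hfilter, PySem.Set.ofList_eq_foldl,
      foldl_ite_filter S (fun rc => pvCt S rc ≥ 4) PySem.Set.empty]
  rfl
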